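-- pv_equiv track=rewrite | github.com/sunwoong00/lesik | Backend/version2.py | before_ingre
-- ===== SOURCE A (Python) =====
-- def before_ingre(list):
--     remove_set = {'\n'}
--     new_list = []
--     list = [i for i in list if i not in remove_set]
--     for ingre in list:
--         temp = ingre.split(" ")
--         ntemp = temp[0:len(temp)-1]
--         new_list.append(' '.join(s for s in ntemp))
--     return new_list
-- ===== SOURCE B (Python) =====
-- def before_ingre(list):
--     # One pass: skip newline entries; for the rest, cut at the last space by
--     # index arithmetic instead of building and truncating a token list.
--     out = []
--     for ingre in list:
--         if ingre == '\n':
--             continue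
--         idx = ingre.rfind(' ')
--         out.append('' if idx == -1 else ingre[:idx])
--     return out
-- ===== Notes on version B (the rewrite author's own statement) =====
-- stated objective: simpler
-- what changed: Single pass with an rfind-based string slice (cut each kept string at its last space, '' when there is none) replaces the filter pass plus split/truncate/join token-list pipeline.
import Mathlib
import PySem

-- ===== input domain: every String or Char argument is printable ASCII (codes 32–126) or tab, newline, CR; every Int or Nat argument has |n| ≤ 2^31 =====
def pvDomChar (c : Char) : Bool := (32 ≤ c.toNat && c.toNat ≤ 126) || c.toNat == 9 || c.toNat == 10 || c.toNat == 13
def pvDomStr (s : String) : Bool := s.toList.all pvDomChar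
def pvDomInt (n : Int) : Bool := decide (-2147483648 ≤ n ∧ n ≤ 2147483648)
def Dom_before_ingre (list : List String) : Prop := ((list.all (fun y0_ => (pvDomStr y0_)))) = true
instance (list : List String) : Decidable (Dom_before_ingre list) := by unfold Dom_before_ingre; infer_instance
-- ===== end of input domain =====

-- B replaces A's filter pass plus split/truncate/join token pipeline by a single pass
-- that cuts each kept string at its last space via rfind (objective: simpler).

-- ===== PORT A =====
def before_ingre (list : List String) : List String :=
  let removeSet : PySem.Set String := PySem.Set.ofList ["\n"]
  let list2 := list.filter (fun i => !(removeSet.contains i))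
  list2.foldl (fun new_list ingre =>
    -- ingre.split(" "): sep " " is nonempty, so split? is always `some`; getD only unwraps it
    let temp := (PySem.Str.split? ingre " ").getD []
    let ntemp := PySem.List.slice temp (some 0) (some ((temp.length : Int) - 1))
    new_list ++ [PySem.Str.join " " ntemp]) []

-- ===== PORT B =====
def before_ingre_alt (list : List String) : List String :=
  list.foldl (fun out ingre =>
    if ingre == "\n" then out
    else
      let idx := PySem.Str.rfind ingre " "
      out ++ [if idx = -1 then "" else PySem.Str.slice ingre none (some idx)]) []

-- ===== PRECONDITION & SPEC =====
def Spec_before_ingre (list : List String) (out : List String) : Prop := out = before_ingre_alt list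
instance (list : List String) (out : List String) : Decidable (Spec_before_ingre list out) := by unfold Spec_before_ingre; infer_instance

-- ===== CLAIM (what is proved, stated in full; the proofs are below) =====
def Claim_equal_before_ingre : Prop := ∀ (list : List String), Dom_before_ingre list → Spec_before_ingre list (before_ingre list)

-- ===== LEMMAS AND PROOFS =====

-- Simple structural model of Python's s.split(" ") (single-char separator).
def split1 : List Char → List (List Char)
  | [] => [[]]
  | c :: cs =>
    if c = ' ' then [] :: split1 cs
    else match split1 cs with
         | [] => [[c]]
         | h :: t => (c :: h) :: t

-- Simple structural model of Python's s.rfind(" ") (single-char needle).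
def rfind1 : List Char → Int
  | [] => -1
  | c :: cs => if rfind1 cs = -1 then (if c = ' ' then 0 else -1) else rfind1 cs + 1

lemma split1_ne_nil (cs : List Char) : split1 cs ≠ [] := by
  cases cs with
  | nil => simp [split1]
  | cons c cs =>
    simp only [split1]
    split
    · simp
    · cases h : split1 cs <;> simp

lemma splitOn_go_eq (l : List Char) : ∀ (fuel : Nat), l.length ≤ fuel →
    ∀ (cur : List Char) (acc : List (List Char)),
    PySem.Chars.splitOn.go [' '] fuel l cur acc
      = acc.reverse ++ (match split1 l with
                        | [] => []
                        | h :: t => (cur.reverse ++ h) :: t) := by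
  induction l with
  | nil =>
    intro fuel _ cur acc
    cases fuel <;> simp [PySem.Chars.splitOn.go, split1]
  | cons c rest ih =>
    intro fuel hf cur acc
    cases fuel with
    | zero => simp at hf
    | succ fuel =>
      rw [PySem.Chars.splitOn.go.eq_3]
      by_cases hc : c = ' '
      · have hp : [' '].isPrefixOf (c :: rest) = true := by simp [List.isPrefixOf, hc]
        rw [if_pos hp]
        have := ih fuel (by simpa using hf) [] (cur.reverse :: acc)
        simp only [List.length_singleton, List.drop_one, List.tail_cons] at this ⊢
        rw [this]
        rcases h : split1 rest with _ | ⟨h1, t1⟩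
        · exact absurd h (split1_ne_nil rest)
        · simp [split1, hc, h]
      · have hp : [' '].isPrefixOf (c :: rest) = false := by
          simp [List.isPrefixOf]
          exact fun h => absurd h.symm hc
        rw [if_neg (by simp [hp])]
        have := ih fuel (by simpa using hf) (c :: cur) acc
        rw [this]
        rcases h : split1 rest with _ | ⟨h1, t1⟩
        · exact absurd h (split1_ne_nil rest)
        · simp [split1, hc, h]

lemma splitOn_eq_split1 (cs : List Char) : PySem.Chars.splitOn cs [' '] = split1 cs := by
  have := splitOn_go_eq cs (cs.length + 1) (by omega) [] []
  rcases h : split1 cs with _ | ⟨h1, t1⟩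
  · exact absurd h (split1_ne_nil cs)
  · simpa [PySem.Chars.splitOn, h] using this

lemma rfind_go_cons (c : Char) (cs : List Char) : ∀ (j : Nat),
    PySem.Chars.rfind.go (c :: cs) [' '] (j + 1)
      = (if PySem.Chars.rfind.go cs [' '] j = -1 then (if c = ' ' then (0 : Int) else -1)
         else PySem.Chars.rfind.go cs [' '] j + 1) := by
  intro j
  induction j with
  | zero =>
    rw [PySem.Chars.rfind.go.eq_2, PySem.Chars.rfind.go.eq_1, PySem.Chars.rfind.go.eq_1]
    simp only [List.drop_succ_cons, List.drop_zero, Nat.zero_add]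
    by_cases hp : [' '].isPrefixOf cs = true
    · simp [hp]
    · simp only [Bool.not_eq_true] at hp
      simp only [hp, Bool.false_eq_true, if_false]
      have hcs : [' '].isPrefixOf (c :: cs) = (c == ' ') := by
        simp [List.isPrefixOf, BEq.comm]
      simp only [hcs]
      by_cases hc : c = ' ' <;> simp [hc]
  | succ j ih =>
    rw [PySem.Chars.rfind.go.eq_2, PySem.Chars.rfind.go.eq_2 cs]
    simp only [List.drop_succ_cons]
    by_cases hp : [' '].isPrefixOf (List.drop (j + 1) cs) = true
    · simp only [hp, if_true]
      have h2 : ((j + 1 : Nat) : Int) ≠ -1 := by omega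
      rw [if_neg h2]
      push_cast; ring
    · simp only [Bool.not_eq_true] at hp
      simp only [hp, Bool.false_eq_true, if_false]
      exact ih

lemma rfind_eq_rfind1 (cs : List Char) : PySem.Chars.rfind cs [' '] = rfind1 cs := by
  induction cs with
  | nil => simp [PySem.Chars.rfind, PySem.Chars.rfind.go, rfind1, List.isPrefixOf]
  | cons c cs ih =>
    show PySem.Chars.rfind.go (c :: cs) [' '] (cs.length + 1) = _
    rw [rfind_go_cons c cs cs.length]
    have hgo : PySem.Chars.rfind.go cs [' '] cs.length = rfind1 cs := ih
    rw [hgo, rfind1]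

lemma rfind1_ge (cs : List Char) : -1 ≤ rfind1 cs := by
  induction cs with
  | nil => simp [rfind1]
  | cons c cs ih =>
    rw [rfind1]
    split
    · split <;> omega
    · omega

lemma split1_single_iff (cs : List Char) : (split1 cs).length = 1 ↔ rfind1 cs = -1 := by
  induction cs with
  | nil => simp [split1, rfind1]
  | cons c cs ih =>
    have hge := rfind1_ge cs
    rw [split1, rfind1]
    by_cases hc : c = ' '
    · simp only [hc, if_true]
      have := split1_ne_nil cs
      constructor
      · intro h; simp at h; exact absurd h this
      · intro h; split at h <;> omega
    · simp only [hc, if_false]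
      rcases h : split1 cs with _ | ⟨h1, t1⟩
      · exact absurd h (split1_ne_nil cs)
      · rw [h] at ih
        simp only [List.length_cons] at ih ⊢
        by_cases hm : rfind1 cs = -1
        · simp [hm, ih.mpr hm]
        · have h2 : rfind1 cs + 1 ≠ -1 := by omega
          simp only [hm, if_false, h2]
          simp only [iff_false]
          intro h3
          exact hm (ih.mp (by simp [h3]))

lemma join_cons_head (c : Char) (h : List Char) (t : List (List Char)) :
    PySem.Chars.join [' '] ((c :: h) :: t) = c :: PySem.Chars.join [' '] (h :: t) := by
  cases t with
  | nil => simp [PySem.Chars.join_singleton]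
  | cons b t' => rw [PySem.Chars.join_cons_cons, PySem.Chars.join_cons_cons]; simp

-- the key per-string fact: join of split-minus-last = prefix before the last space
lemma core (cs : List Char) :
    PySem.Chars.join [' '] ((split1 cs).dropLast)
      = (if rfind1 cs = -1 then [] else cs.take (rfind1 cs).toNat) := by
  induction cs with
  | nil => simp [split1, rfind1, PySem.Chars.join_nil]
  | cons c cs ih =>
    have hge := rfind1_ge cs
    rw [split1, rfind1]
    by_cases hm : rfind1 cs = -1
    · have hlen : (split1 cs).length = 1 := (split1_single_iff cs).mpr hm
      rcases hs : split1 cs with _ | ⟨h1, t1⟩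
      · exact absurd hs (split1_ne_nil cs)
      · rw [hs] at hlen; simp at hlen; subst hlen
        by_cases hc : c = ' '
        · simp [hc, hm, PySem.Chars.join_singleton]
        · simp [hc, hm, PySem.Chars.join_nil]
    · have hlen : (split1 cs).length ≠ 1 := fun h => hm ((split1_single_iff cs).mp h)
      rcases hs : split1 cs with _ | ⟨h1, t1⟩
      · exact absurd hs (split1_ne_nil cs)
      · have ht1 : t1 ≠ [] := by rintro rfl; simp [hs] at hlen
        rw [hs] at ih
        have hne1 : rfind1 cs + 1 ≠ -1 := by omega
        have htn : (rfind1 cs + 1).toNat = (rfind1 cs).toNat + 1 := by omega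
        by_cases hc : c = ' '
        · simp only [hc, if_true, hm, if_false, hne1, htn]
          rw [List.dropLast_cons_of_ne_nil (by simp)]
          have hd : (h1 :: t1).dropLast = h1 :: t1.dropLast := List.dropLast_cons_of_ne_nil ht1
          rw [hd]
          rw [PySem.Chars.join_cons_cons]
          simp only [List.nil_append]
          rw [← hd, ih, if_neg hm]
          simp [List.take_succ_cons]
        · simp only [hc, if_false, hm, hne1, htn]
          rw [List.dropLast_cons_of_ne_nil (by simpa using ht1)]
          rw [join_cons_head]
          have hd : (h1 :: t1).dropLast = h1 :: t1.dropLast := List.dropLast_cons_of_ne_nil ht1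
          rw [← hd, ih, if_neg hm]
          simp [List.take_succ_cons]

lemma slice_drop_last {α : Type} (xs : List α) :
    PySem.List.slice xs (some 0) (some ((xs.length : Int) - 1)) = xs.dropLast := by
  rcases xs with _ | ⟨a, l⟩
  · simp [PySem.List.slice, PySem.List.clampIdx]
  · have h : (((a::l).length : Int)) - 1 = ((l.length : Nat) : Int) := by simp
    rw [h, show ((0:Int)) = ((0:Nat):Int) from rfl, PySem.List.slice_natCast]
    simp [List.dropLast_eq_take]

-- the per-element functions of the two ports agree on every string
lemma elem_eq (s : String) :
    PySem.Str.join " "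
        (PySem.List.slice ((PySem.Str.split? s " ").getD [])
          (some 0) (some ((((PySem.Str.split? s " ").getD []).length : Int) - 1)))
      = (if PySem.Str.rfind s " " = -1 then ""
         else PySem.Str.slice s none (some (PySem.Str.rfind s " "))) := by
  have hsep : (" " : String).toList = [' '] := rfl
  have hsplit : (PySem.Str.split? s " ").getD [] = (split1 s.toList).map String.ofList := by
    simp [PySem.Str.split?, PySem.Chars.split?, hsep, splitOn_eq_split1]
  have hrf : PySem.Str.rfind s " " = rfind1 s.toList := by
    rw [PySem.Str.rfind_eq, hsep, rfind_eq_rfind1]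
  have hge := rfind1_ge s.toList
  apply String.toList_inj.mp
  rw [hsplit, hrf]
  rw [slice_drop_last]
  rw [PySem.Str.toList_join]
  have hmt : (((List.map String.ofList (split1 s.toList)).dropLast).map String.toList)
      = (split1 s.toList).dropLast := by
    rw [← List.map_dropLast, List.map_map]
    simp [Function.comp_def]
  rw [hmt, hsep, core]
  by_cases hm : rfind1 s.toList = -1
  · simp [hm]
  · rw [if_neg hm, if_neg hm]
    rw [PySem.Str.toList_slice, PySem.Chars.slice_eq_listSlice,
        PySem.List.slice_to s.toList (by omega)]

-- fold shapes: both ports are `map` over the same filtered list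
lemma foldB_eq (l : List String) (acc : List String) :
    l.foldl (fun out ingre =>
      if ingre == "\n" then out
      else
        let idx := PySem.Str.rfind ingre " "
        out ++ [if idx = -1 then "" else PySem.Str.slice ingre none (some idx)]) acc
    = acc ++ (l.filter (fun i => !(i == "\n"))).map
        (fun ingre => if PySem.Str.rfind ingre " " = -1 then ""
                      else PySem.Str.slice ingre none (some (PySem.Str.rfind ingre " "))) := by
  have h : (fun (out : List String) (ingre : String) =>
      if ingre == "\n" then out
      else
        let idx := PySem.Str.rfind ingre " "
        out ++ [if idx = -1 then "" else PySem.Str.slice ingre none (some idx)])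
      = (fun out ingre =>
        if (!(ingre == "\n")) = true
        then out ++ [if PySem.Str.rfind ingre " " = -1 then ""
                     else PySem.Str.slice ingre none (some (PySem.Str.rfind ingre " "))]
        else out) := by
    funext o i
    cases i == "\n" <;> simp
  rw [h, PySem.List.foldl_append_if]

lemma contains_removeSet (i : String) :
    (PySem.Set.ofList ["\n"] : PySem.Set String).contains i = (i == "\n") := by
  show List.contains ["\n"] i = _
  rw [List.contains_cons]
  simp

-- ===== VERDICT (by name: the statement is the Claim_ definition above) =====
theorem before_ingre_spec : Claim_equal_before_ingre := by
  intro list _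
  show before_ingre list = before_ingre_alt list
  rw [before_ingre, before_ingre_alt]
  simp only [contains_removeSet]
  rw [foldB_eq, PySem.List.foldl_append_singleton_eq_map]
  simp only [List.nil_append]
  exact List.map_congr_left (fun s _ => elem_eq s)
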